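-- pv_equiv track=rewrite | github.com/jonesy346/substack-infra-problems | 1_What_is_an_LLM?/question_1.py | parse_training_data
-- ===== SOURCE A (Python) =====
-- def parse_training_data(data):
--     # algorithm: standard array iteration
--
--     wordToNextWordToFrequency = {}
--
--     # iterate through array
--     for i in range(len(data) - 1):
--         # process current element
--         word = data[i]
--         nextWord = data[i + 1]
--         nextWordFreq = wordToNextWordToFrequency.get(word, {})
--         nextWordFreq[nextWord] = nextWordFreq.get(nextWord, 0) + 1
--         wordToNextWordToFrequency[word] = nextWordFreq
--
--     return wordToNextWordToFrequency
-- ===== SOURCE B (Python) =====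
-- from collections import Counter
--
--
-- def parse_training_data(data):
--     # phase 1: index each word to the list of all words that follow it
--     groups = {}
--     for word, next_word in zip(data, data[1:]):
--         groups.setdefault(word, []).append(next_word)
--     # phase 2: turn each successor list into a frequency table
--     return {word: dict(Counter(nexts)) for word, nexts in groups.items()}
-- ===== Notes on version B (the rewrite author's own statement) =====
-- stated objective: idiomatic
-- what changed: A's single incremental nested-dict-count loop is split into two phases: zip(data, data[1:]) groups all successors per word into lists, then each list is counted with collections.Counter.
import Mathlib
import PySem

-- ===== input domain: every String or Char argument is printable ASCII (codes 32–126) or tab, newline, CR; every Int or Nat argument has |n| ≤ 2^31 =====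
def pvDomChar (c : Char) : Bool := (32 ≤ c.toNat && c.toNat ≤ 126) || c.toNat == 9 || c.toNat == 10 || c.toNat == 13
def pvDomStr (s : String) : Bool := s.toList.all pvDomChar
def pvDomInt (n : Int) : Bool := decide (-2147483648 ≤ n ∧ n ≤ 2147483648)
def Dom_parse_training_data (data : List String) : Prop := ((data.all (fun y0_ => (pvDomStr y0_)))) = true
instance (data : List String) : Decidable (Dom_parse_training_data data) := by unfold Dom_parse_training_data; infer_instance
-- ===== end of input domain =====

-- B builds a successor-list index in one pass and counts each list with Counter in a second pass,
-- instead of A's single incremental nested-dict update; objective: idiomatic two-phase decomposition.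

-- ===== PORT A =====
-- dicts are PySem.Dict; the returned nested dict is rendered as its items lists (association lists).
-- data[i] / data[i+1] with i in range(len(data)-1) is always in range, so pyGetD's default "" is never used.
def parse_training_data (data : List String) : List (String × List (String × Int)) :=
  let table := (PySem.List.pyRange 0 ((data.length : Int) - 1) 1).foldl
    (fun (acc : PySem.Dict String (PySem.Dict String Int)) i =>
      let word := PySem.List.pyGetD data i ""
      let nextWord := PySem.List.pyGetD data (i + 1) ""
      let nextWordFreq := acc.getD word PySem.Dict.empty
      let nextWordFreq' := nextWordFreq.insert nextWord (nextWordFreq.getD nextWord 0 + 1)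
      acc.insert word nextWordFreq')
    PySem.Dict.empty
  table.items.map (fun p => (p.1, p.2.items))

-- ===== PORT B =====
-- groups.setdefault(w, []).append(nw) is exactly Dict.modify w [] (· ++ [nw]); Counter is PySem.Dict.counter.
def parse_training_data_alt (data : List String) : List (String × List (String × Int)) :=
  let groups := (data.zip data.tail).foldl
    (fun (g : PySem.Dict String (List String)) p => g.modify p.1 [] (· ++ [p.2]))
    PySem.Dict.empty
  groups.items.map (fun p => (p.1, (PySem.Dict.counter p.2).items))

-- ===== PRECONDITION & SPEC =====
def Spec_parse_training_data (data : List String) (out : List (String × List (String × Int))) : Prop := out = parse_training_data_alt data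
instance (data : List String) (out : List (String × List (String × Int))) : Decidable (Spec_parse_training_data data out) := by unfold Spec_parse_training_data; infer_instance

-- ===== CLAIM (what is proved, stated in full; the proofs are below) =====
def Claim_equal_parse_training_data : Prop := ∀ (data : List String), Dom_parse_training_data data → Spec_parse_training_data data (parse_training_data data)

-- ===== LEMMAS AND PROOFS =====

-- A's loop body, seen as a function of the adjacent pair it processes
def pvStepA (acc : PySem.Dict String (PySem.Dict String Int)) (p : String × String) :
    PySem.Dict String (PySem.Dict String Int) :=
  let inner := acc.getD p.1 PySem.Dict.empty
  acc.insert p.1 (inner.insert p.2 (inner.getD p.2 0 + 1))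

-- B's grouping loop body
def pvStepB (g : PySem.Dict String (List String)) (p : String × String) :
    PySem.Dict String (List String) :=
  g.modify p.1 [] (· ++ [p.2])

-- counting each successor list of a groups dict
def pvMapCount (g : PySem.Dict String (List String)) : PySem.Dict String (PySem.Dict String Int) :=
  PySem.Dict.mk (g.items.map (fun p => (p.1, PySem.Dict.counter p.2)))

theorem pvKeys_mapCount (g : PySem.Dict String (List String)) : (pvMapCount g).keys = g.keys := by
  simp [pvMapCount, PySem.Dict.keys]

theorem pvContains_mapCount (g : PySem.Dict String (List String)) (w : String) :
    (pvMapCount g).contains w = g.contains w := by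
  rw [PySem.Dict.contains_eq_decide_mem_keys, PySem.Dict.contains_eq_decide_mem_keys,
    pvKeys_mapCount]

theorem pvGetD_mapCount (g : PySem.Dict String (List String)) (w : String)
    (h : g.keys.Nodup) :
    (pvMapCount g).getD w PySem.Dict.empty = PySem.Dict.counter (g.getD w []) := by
  by_cases hc : g.contains w = true
  · obtain ⟨l, hl⟩ : ∃ l, (w, l) ∈ g.items := by
      rw [PySem.Dict.contains_iff_mem_keys] at hc
      simp only [PySem.Dict.keys, List.mem_map] at hc
      obtain ⟨p, hp, hw⟩ := hc
      exact ⟨p.2, by simpa [← hw] using hp⟩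
    have h1 : g.getD w [] = l := PySem.Dict.getD_of_mem_items g hl h []
    have h2 : (w, PySem.Dict.counter l) ∈ (pvMapCount g).items := by
      simp only [pvMapCount, List.mem_map]
      exact ⟨(w, l), hl, rfl⟩
    have h3 : (pvMapCount g).keys.Nodup := by rw [pvKeys_mapCount]; exact h
    rw [PySem.Dict.getD_of_mem_items _ h2 h3, h1]
  · have hc' : g.contains w = false := by simpa using hc
    rw [PySem.Dict.getD_of_not_contains _ _ hc',
      PySem.Dict.getD_of_not_contains _ _ (by rw [pvContains_mapCount]; exact hc')]
    rfl

theorem pvMapCount_insert (g : PySem.Dict String (List String)) (w : String) (l : List String) :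
    pvMapCount (g.insert w l) = (pvMapCount g).insert w (PySem.Dict.counter l) := by
  apply PySem.Dict.ext
  show (g.insert w l).items.map _ = ((pvMapCount g).insert w (PySem.Dict.counter l)).items
  rw [PySem.Dict.items_insert, PySem.Dict.items_insert, pvContains_mapCount]
  by_cases hc : g.contains w = true
  · simp only [hc, if_true, pvMapCount, List.map_map]
    apply List.map_congr_left
    intro p _
    by_cases hw : p.1 = w <;> simp [hw]
  · simp [hc, pvMapCount]

theorem pvStep_commute (g : PySem.Dict String (List String)) (p : String × String)
    (h : g.keys.Nodup) :
    pvStepA (pvMapCount g) p = pvMapCount (pvStepB g p) := by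
  show _ = pvMapCount (g.insert p.1 (g.getD p.1 [] ++ [p.2]))
  rw [pvMapCount_insert, PySem.Dict.counter_append_singleton]
  show (pvMapCount g).insert p.1
      (((pvMapCount g).getD p.1 PySem.Dict.empty).insert p.2
        (((pvMapCount g).getD p.1 PySem.Dict.empty).getD p.2 0 + 1)) = _
  rw [pvGetD_mapCount g p.1 h]
  rfl

theorem pvNodup_stepB (g : PySem.Dict String (List String)) (p : String × String)
    (h : g.keys.Nodup) : (pvStepB g p).keys.Nodup := by
  show ((g.modify p.1 [] (· ++ [p.2]))).keys.Nodup
  rw [PySem.Dict.keys_modify]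
  exact PySem.Dict.nodup_keys_insert _ _ _ h

theorem pvFold_commute (ps : List (String × String)) :
    ∀ g : PySem.Dict String (List String), g.keys.Nodup →
      ps.foldl pvStepA (pvMapCount g) = pvMapCount (ps.foldl pvStepB g) := by
  induction ps with
  | nil => intro g _; rfl
  | cons p ps ih =>
    intro g h
    simp only [List.foldl_cons]
    rw [pvStep_commute g p h]
    exact ih _ (pvNodup_stepB g p h)

-- the index loop over range(len(data)-1) reads exactly the adjacent pairs zip(data, data[1:])
theorem pvPairs_eq (l : List String) :
    (PySem.List.pyRange 0 ((l.length : Int) - 1) 1).map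
      (fun i => (PySem.List.pyGetD l i "", PySem.List.pyGetD l (i + 1) "")) = l.zip l.tail := by
  cases l with
  | nil => rfl
  | cons x xs =>
    have hlen : ((x :: xs).length : Int) - 1 = (xs.length : Int) := by
      simp [List.length_cons]
    rw [hlen, PySem.List.pyRange_zero_natCast, List.map_map]
    apply List.ext_getElem
    · simp
    · intro k h1 h2
      have hk : k < xs.length := by simpa using h1
      have hk1 : (k : Int) < ((x :: xs).length : Int) := by
        simp only [List.length_cons]; exact_mod_cast Nat.lt_succ_of_lt hk
      have hk2 : ((k : Int) + 1) < ((x :: xs).length : Int) := by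
        simp only [List.length_cons]; push_cast; omega
      simp only [List.getElem_map, List.getElem_range, Function.comp_apply, List.getElem_zip]
      rw [PySem.List.pyGetD_eq_getElem _ _ (by positivity) hk1,
        PySem.List.pyGetD_eq_getElem _ _ (by positivity) hk2]
      have e1 : ((k : Int)).toNat = k := by omega
      have e2 : ((k : Int) + 1).toNat = k + 1 := by omega
      simp [e1, e2]

-- ===== VERDICT (by name: the statement is the Claim_ definition above) =====
theorem parse_training_data_spec : Claim_equal_parse_training_data := by
  intro data _
  show parse_training_data data = parse_training_data_alt data
  have hA : parse_training_data data =
      (((PySem.List.pyRange 0 ((data.length : Int) - 1) 1).map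
          (fun i => (PySem.List.pyGetD data i "", PySem.List.pyGetD data (i + 1) ""))).foldl
        pvStepA PySem.Dict.empty).items.map (fun p => (p.1, p.2.items)) := by
    rw [List.foldl_map]; rfl
  rw [hA, pvPairs_eq]
  have hmc : (PySem.Dict.empty : PySem.Dict String (PySem.Dict String Int)) =
      pvMapCount PySem.Dict.empty := rfl
  rw [hmc, pvFold_commute _ _ PySem.Dict.nodup_keys_empty]
  show (pvMapCount _).items.map _ = parse_training_data_alt data
  simp only [pvMapCount, List.map_map]
  rfl
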